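-- pv_equiv track=rewrite | github.com/camillonunez1998/Code-generation-in-a-logic-language | Translator/input_output.py | o_n
-- ===== SOURCE A (Python) =====
-- def o_n(path):
--     output_name='.v'
--     path=path[:-4]
--     for i in range(len(path)-1,-1,-1):
--         if path[i]=='/':
--             break
--         output_name=''.join([path[i],output_name])
--     return output_name
-- ===== SOURCE B (Python) =====
-- def o_n(path):
--     seg = ''
--     for c in path[:-4]:
--         seg = '' if c == '/' else seg + c
--     return seg + '.v'
-- ===== Notes on version B (the rewrite author's own statement) =====
-- stated objective: alternative
-- what changed: Replaces A's backward scan with break and char-by-char prepend by a single forward pass that accumulates the current segment and clears it at each path separator.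
import Mathlib
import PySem

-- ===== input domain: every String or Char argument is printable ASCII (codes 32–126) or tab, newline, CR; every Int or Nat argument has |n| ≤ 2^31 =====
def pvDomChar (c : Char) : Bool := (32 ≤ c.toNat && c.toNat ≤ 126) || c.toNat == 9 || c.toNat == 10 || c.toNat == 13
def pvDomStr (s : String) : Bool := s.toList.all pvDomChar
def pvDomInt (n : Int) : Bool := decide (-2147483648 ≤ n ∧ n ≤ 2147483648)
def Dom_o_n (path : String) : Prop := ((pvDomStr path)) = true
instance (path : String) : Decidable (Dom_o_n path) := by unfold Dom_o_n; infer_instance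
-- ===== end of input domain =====

-- B replaces A's backward break-loop with a forward pass that clears its segment accumulator at each path separator.

-- ===== PORT A =====
-- A's loop 'for i in range(len(path)-1,-1,-1)' visits the chars of name back to front
-- (every index in range, so path[i] is total); transliterated as recursion over name.reverse,
-- 'break' = stop at the first '/', else prepend the char to the accumulator.
def o_n_loop : List Char → List Char → List Char
  | [], acc => acc
  | c :: rest, acc => if c = '/' then acc else o_n_loop rest (c :: acc)

def o_n (path : String) : String :=
  let name := PySem.List.slice path.toList none (some (-4))   -- path[:-4]
  String.ofList (o_n_loop name.reverse ['.', 'v'])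

-- ===== PORT B =====
-- forward fold over path[:-4]: seg = '' if c == '/' else seg + c
def o_n_alt (path : String) : String :=
  let seg := (PySem.List.slice path.toList none (some (-4))).foldl
      (fun seg c => if c = '/' then [] else seg ++ [c]) []
  String.ofList (seg ++ ['.', 'v'])

-- ===== PRECONDITION & SPEC =====
def Spec_o_n (path : String) (out : String) : Prop := out = o_n_alt path
instance (path : String) (out : String) : Decidable (Spec_o_n path out) := by unfold Spec_o_n; infer_instance

-- ===== CLAIM (what is proved, stated in full; the proofs are below) =====
def Claim_equal_o_n : Prop := ∀ (path : String), Dom_o_n path → Spec_o_n path (o_n path)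

-- ===== LEMMAS AND PROOFS =====

theorem o_n_loop_eq (r : List Char) : ∀ acc,
    o_n_loop r acc = (r.takeWhile (· ≠ '/')).reverse ++ acc := by
  induction r with
  | nil => intro acc; simp [o_n_loop]
  | cons c rest ih =>
    intro acc
    by_cases h : c = '/'
    · simp [o_n_loop, h, List.takeWhile]
    · simp [o_n_loop, h, List.takeWhile, ih]

theorem o_n_fold_eq (name : List Char) :
    name.foldl (fun seg c => if c = '/' then [] else seg ++ [c]) []
      = (name.reverse.takeWhile (· ≠ '/')).reverse := by
  induction name using List.reverseRecOn with
  | nil => simp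
  | append_singleton xs c ih =>
    by_cases h : c = '/'
    · simp [h]
    · simp [h, ih]

-- ===== VERDICT (by name: the statement is the Claim_ definition above) =====
theorem o_n_spec : Claim_equal_o_n := by
  intro path _
  unfold Spec_o_n
  simp only [o_n, o_n_alt]
  rw [o_n_loop_eq, o_n_fold_eq]
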